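-- pv_equiv track=rewrite | github.com/chen172/chen172.github.io | scripts/generate_webster.py | generate_unit_html
-- ===== SOURCE A (Python) =====
-- def generate_unit_html(unit_number, json_data):
--     """
--     Generates the HTML content for a given unit using the provided JSON data.
--     """
--     unit_name = f"Unit {unit_number}"
--     unit_section_html = f'''
--     <div class="unit-section">
--         <div class="unit-header">
--             <a href="Merriam-Webster's_Vocabulary_Builder/Unit{unit_number}.txt.html">{unit_name}</a>
--             <a href="Merriam-Webster's_Vocabulary_Builder/Unit{unit_number}_supplement.txt.html">[Supplement]</a>
--         </div>
--         <table class="unit-table">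
--             <tbody>
--     '''
--
--     # Loop through the roots in the JSON data and generate the table rows (2 roots per row)
--     row = []
--     for entry in json_data:
--         root = entry['root']
--
--         # Add the root to the current row
--         row.append(f'<td><a href="Merriam-Webster\'s_Vocabulary_Builder/Unit{unit_number}.txt.html#{root}">{root}</a></td>')
--
--         # If the row has two roots, add the quiz link and close the row
--         if len(row) == 2:
--             unit_section_html += f'''
--                 <tr>
--                     {''.join(row)}
--                     <td><a href="Merriam-Webster\'s_Vocabulary_Builder/Unit{unit_number}.txt.html#QUIZ">Quiz</a></td>
--                 </tr>
--             '''
--             row = []  # Reset the row for the next pair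
--
--     # If there's an odd number of roots, add the last one and a quiz link
--     if row:
--         unit_section_html += f'''
--             <tr>
--                 {''.join(row)}
--                 <td><a href="Merriam-Webster\'s_Vocabulary_Builder/Unit{unit_number}.txt.html#QUIZ">Quiz</a></td>
--             </tr>
--         '''
--
--     # Close the unit section HTML
--     unit_section_html += '''
--             </tbody>
--         </table>
--     </div>
--     '''
--
--     return unit_section_html
-- ===== SOURCE B (Python) =====
-- PAIR_ROW = '''
--                 <tr>
--                     {cells}
--                     <td><a href="{base}.txt.html#QUIZ">Quiz</a></td>
--                 </tr>
--             '''
--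
-- LAST_ROW = '''
--             <tr>
--                 {cells}
--                 <td><a href="{base}.txt.html#QUIZ">Quiz</a></td>
--             </tr>
--         '''
--
--
-- def generate_unit_html(unit_number, json_data):
--     """
--     Generates the HTML content for a given unit using the provided JSON data.
--     """
--     base = f"Merriam-Webster's_Vocabulary_Builder/Unit{unit_number}"
--     cells = [
--         f'<td><a href="{base}.txt.html#{e["root"]}">{e["root"]}</a></td>'
--         for e in json_data
--     ]
--
--     html = f'''
--     <div class="unit-section">
--         <div class="unit-header">
--             <a href="{base}.txt.html">Unit {unit_number}</a>
--             <a href="{base}_supplement.txt.html">[Supplement]</a>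
--         </div>
--         <table class="unit-table">
--             <tbody>
--     '''
--
--     it = iter(cells)
--     html += ''.join(PAIR_ROW.format(base=base, cells=a + b) for a, b in zip(it, it))
--     if len(cells) % 2:
--         html += LAST_ROW.format(base=base, cells=cells[-1])
--
--     return html + '''
--             </tbody>
--         </table>
--     </div>
--     '''
-- ===== Notes on version B (the rewrite author's own statement) =====
-- stated objective: alternative
-- what changed: Replaces A's stateful row buffer that flushes inside the loop at length 2 (plus a post-loop leftover branch) with a functional pipeline: precompute all <td> cells once, pair them with zip(it, it), join one template per pair, and append the single trailing row for an odd count; Pre_ excludes entries lacking a 'root' key, on which A raises KeyError.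
import Mathlib
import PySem

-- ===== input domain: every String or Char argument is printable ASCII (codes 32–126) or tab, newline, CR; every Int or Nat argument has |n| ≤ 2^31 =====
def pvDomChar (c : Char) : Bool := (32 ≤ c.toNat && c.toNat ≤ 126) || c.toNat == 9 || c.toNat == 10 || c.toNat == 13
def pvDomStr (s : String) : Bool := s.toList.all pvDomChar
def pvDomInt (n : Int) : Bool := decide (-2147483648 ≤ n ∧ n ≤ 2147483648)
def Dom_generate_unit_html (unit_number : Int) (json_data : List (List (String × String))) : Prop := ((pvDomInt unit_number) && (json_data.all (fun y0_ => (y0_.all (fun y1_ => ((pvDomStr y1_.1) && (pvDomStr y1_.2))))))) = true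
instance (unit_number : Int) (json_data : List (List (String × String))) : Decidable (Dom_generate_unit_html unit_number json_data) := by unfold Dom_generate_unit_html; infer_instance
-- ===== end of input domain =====

-- B replaces A's stateful row buffer (flush at length 2 inside the loop, leftover branch after it)
-- by a functional pipeline: all cells computed once, paired two at a time, one template per pair,
-- one optional trailing row (objective: alternative decomposition, same cost).

-- ===== PORT A =====
-- A's loop body: append this entry's cell to the row buffer; flush a <tr> when it holds two.
def pvA_step (unit_number : Int) (st : String × List String) (entry : List (String × String)) : String × List String :=
  let root := (entry.lookup "root").getD ""
  let row := st.2 ++ ["<td><a href=\"Merriam-Webster's_Vocabulary_Builder/Unit" ++ PySem.Int.toStr unit_number ++ ".txt.html#" ++ root ++ "\">" ++ root ++ "</a></td>"]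
  if row.length == 2 then
    (st.1 ++ ("\n                <tr>\n                    " ++ PySem.Str.join "" row ++ "\n                    <td><a href=\"Merriam-Webster's_Vocabulary_Builder/Unit" ++ PySem.Int.toStr unit_number ++ ".txt.html#QUIZ\">Quiz</a></td>\n                </tr>\n            "), [])
  else
    (st.1, row)

def generate_unit_html (unit_number : Int) (json_data : List (List (String × String))) : String :=
  let unit_name := "Unit " ++ PySem.Int.toStr unit_number
  let header := "\n    <div class=\"unit-section\">\n        <div class=\"unit-header\">\n            <a href=\"Merriam-Webster's_Vocabulary_Builder/Unit" ++ PySem.Int.toStr unit_number ++ ".txt.html\">" ++ unit_name ++ "</a>\n            <a href=\"Merriam-Webster's_Vocabulary_Builder/Unit" ++ PySem.Int.toStr unit_number ++ "_supplement.txt.html\">[Supplement]</a>\n        </div>\n        <table class=\"unit-table\">\n            <tbody>\n    "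
  let st := json_data.foldl (pvA_step unit_number) (header, [])
  let html := if st.2.isEmpty then st.1
    else st.1 ++ ("\n            <tr>\n                " ++ PySem.Str.join "" st.2 ++ "\n                <td><a href=\"Merriam-Webster's_Vocabulary_Builder/Unit" ++ PySem.Int.toStr unit_number ++ ".txt.html#QUIZ\">Quiz</a></td>\n            </tr>\n        ")
  html ++ "\n            </tbody>\n        </table>\n    </div>\n    "

-- ===== PORT B =====
-- PAIR_ROW.format(base=…, cells=…) / LAST_ROW.format(base=…, cells=…): the two module templates.
def pvPairRow (base cells : String) : String :=
  "\n                <tr>\n                    " ++ cells ++ "\n                    <td><a href=\"" ++ base ++ ".txt.html#QUIZ\">Quiz</a></td>\n                </tr>\n            "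
def pvLastRow (base cells : String) : String :=
  "\n            <tr>\n                " ++ cells ++ "\n                <td><a href=\"" ++ base ++ ".txt.html#QUIZ\">Quiz</a></td>\n            </tr>\n        "
-- zip(it, it) on one iterator yields the consecutive disjoint pairs of the list (exact).
def pvPairs {α : Type} : List α → List (α × α)
  | a :: b :: rest => (a, b) :: pvPairs rest
  | _ => []

def generate_unit_html_alt (unit_number : Int) (json_data : List (List (String × String))) : String :=
  let base := "Merriam-Webster's_Vocabulary_Builder/Unit" ++ PySem.Int.toStr unit_number
  let cells := json_data.map (fun e =>
    let root := (e.lookup "root").getD ""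
    "<td><a href=\"" ++ base ++ ".txt.html#" ++ root ++ "\">" ++ root ++ "</a></td>")
  let html := "\n    <div class=\"unit-section\">\n        <div class=\"unit-header\">\n            <a href=\"" ++ base ++ ".txt.html\">Unit " ++ PySem.Int.toStr unit_number ++ "</a>\n            <a href=\"" ++ base ++ "_supplement.txt.html\">[Supplement]</a>\n        </div>\n        <table class=\"unit-table\">\n            <tbody>\n    "
  let html := html ++ PySem.Str.join "" ((pvPairs cells).map (fun p => pvPairRow base (p.1 ++ p.2)))
  let html := if cells.length % 2 == 1 then html ++ pvLastRow base ((PySem.List.pyGet? cells (-1)).getD "") else html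
  html ++ "\n            </tbody>\n        </table>\n    </div>\n    "

-- ===== PRECONDITION & SPEC =====
-- Pre_ excludes exactly the inputs where some entry lacks a "root" key: there Python A raises KeyError.
def Pre_generate_unit_html (_unit_number : Int) (json_data : List (List (String × String))) : Prop :=
  ∀ e ∈ json_data, (e.lookup "root").isSome = true

instance (unit_number : Int) (json_data : List (List (String × String))) : Decidable (Pre_generate_unit_html unit_number json_data) := by unfold Pre_generate_unit_html; infer_instance

def pvWitness_generate_unit_html : Int × (List (List (String × String))) :=
  (3, [[("root", "AG")], [("root", "PED")], [("root", "CRIM")]])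

def Spec_generate_unit_html (unit_number : Int) (json_data : List (List (String × String))) (out : String) : Prop := out = generate_unit_html_alt unit_number json_data
instance (unit_number : Int) (json_data : List (List (String × String))) (out : String) : Decidable (Spec_generate_unit_html unit_number json_data out) := by unfold Spec_generate_unit_html; infer_instance

-- ===== CLAIM =====
def Claim_equal_generate_unit_html : Prop := ∀ (unit_number : Int) (json_data : List (List (String × String))), Dom_generate_unit_html unit_number json_data → Pre_generate_unit_html unit_number json_data → Spec_generate_unit_html unit_number json_data (generate_unit_html unit_number json_data)

-- ===== LEMMAS AND PROOFS =====

-- the cell string A builds for one entry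
def pvCell (unit_number : Int) (e : List (String × String)) : String :=
  let root := (e.lookup "root").getD ""
  "<td><a href=\"Merriam-Webster's_Vocabulary_Builder/Unit" ++ PySem.Int.toStr unit_number ++ ".txt.html#" ++ root ++ "\">" ++ root ++ "</a></td>"

-- A's post-loop finish: the trailing-odd branch
def pvFinishA (u : Int) (st : String × List String) : String :=
  if st.2.isEmpty then st.1
  else st.1 ++ ("\n            <tr>\n                " ++ PySem.Str.join "" st.2 ++ "\n                <td><a href=\"Merriam-Webster's_Vocabulary_Builder/Unit" ++ PySem.Int.toStr u ++ ".txt.html#QUIZ\">Quiz</a></td>\n            </tr>\n        ")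

theorem pvJoin_empty_cons (a : String) (l : List String) :
    PySem.Str.join "" (a :: l) = a ++ PySem.Str.join "" l := by
  simp [PySem.Str.join, PySem.Chars.join, List.intercalate, String.ext_iff]
  induction l with
  | nil => simp
  | cons b t _ => simp

theorem pvGetLast?_cons_cons {α : Type} (a b : α) (l : List α) (h : l ≠ []) :
    (a :: b :: l).getLast? = l.getLast? := by
  rw [List.getLast?_cons_cons]
  cases l with
  | nil => exact absurd rfl h
  | cons c t => rw [List.getLast?_cons_cons]

-- B's row assembly applied at accumulator s
def pvB_core (u : Int) (s : String) (entries : List (List (String × String))) : String :=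
  let base := "Merriam-Webster's_Vocabulary_Builder/Unit" ++ PySem.Int.toStr u
  let cells := entries.map (pvCell u)
  let h := s ++ PySem.Str.join "" ((pvPairs cells).map (fun p => pvPairRow base (p.1 ++ p.2)))
  if cells.length % 2 == 1 then h ++ pvLastRow base ((PySem.List.pyGet? cells (-1)).getD "") else h

-- A's flush-on-two loop, finished with its trailing-odd branch, equals B's pair/trailing assembly.
theorem pvLoop_eq (u : Int) : ∀ (n : Nat) (entries : List (List (String × String))), entries.length ≤ n → ∀ (s : String),
    pvFinishA u (entries.foldl (pvA_step u) (s, [])) = pvB_core u s entries := by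
  intro n
  induction n with
  | zero =>
    intro entries hle s
    have : entries = [] := List.eq_nil_of_length_eq_zero (Nat.le_zero.mp hle)
    subst this
    simp [pvFinishA, pvB_core, pvPairs, PySem.Str.join]
  | succ n ih =>
    intro entries hle s
    match entries with
    | [] => simp [pvFinishA, pvB_core, pvPairs, PySem.Str.join]
    | [e] =>
      simp [pvFinishA, pvB_core, pvA_step, pvPairs, pvCell, pvLastRow,
            PySem.List.pyGet?_neg_one,
            PySem.Str.join, PySem.Chars.join, List.intercalate,
            String.ext_iff, String.append_assoc]
    | e1 :: e2 :: rest =>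
      have hr : rest.length ≤ n := by simp at hle; omega
      rw [List.foldl_cons, List.foldl_cons]
      have h1 : pvA_step u (s, []) e1 = (s, [pvCell u e1]) := by
        simp [pvA_step, pvCell]
      have h2 : pvA_step u (s, [pvCell u e1]) e2
          = (s ++ ("\n                <tr>\n                    " ++ PySem.Str.join "" [pvCell u e1, pvCell u e2] ++ "\n                    <td><a href=\"Merriam-Webster's_Vocabulary_Builder/Unit" ++ PySem.Int.toStr u ++ ".txt.html#QUIZ\">Quiz</a></td>\n                </tr>\n            "), []) := by
        simp [pvA_step, pvCell]
      rw [h1, h2, ih rest hr]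
      -- now a pure statement about B's assembly: prepending one pair row
      unfold pvB_core
      dsimp only
      simp only [List.map_cons, pvPairs, List.length_cons, pvJoin_empty_cons]
      have hpar : ((rest.map (pvCell u)).length + 1 + 1) % 2 = (rest.map (pvCell u)).length % 2 := by
        omega
      rw [hpar]
      by_cases hodd : (rest.map (pvCell u)).length % 2 = 1
      · have hne : rest.map (pvCell u) ≠ [] := by
          intro h; rw [h] at hodd; simp at hodd
        have hcond : (((rest.map (pvCell u)).length % 2 == 1) = true) := by simpa using hodd
        rw [if_pos hcond, if_pos hcond]
        simp only [PySem.List.pyGet?_neg_one,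
          pvGetLast?_cons_cons (pvCell u e1) (pvCell u e2) (rest.map (pvCell u)) hne]
        rw [String.ext_iff]
        simp [pvPairRow, pvCell, String.append_assoc]
      · have hcond : (((rest.map (pvCell u)).length % 2 == 1) = false) := by simpa using hodd
        rw [if_neg (by rw [hcond]; simp), if_neg (by rw [hcond]; simp)]
        rw [String.ext_iff]
        simp [pvPairRow, pvCell, String.append_assoc]

-- ===== VERDICT =====
theorem generate_unit_html_spec : Claim_equal_generate_unit_html := by
  intro u json_data _hDom _hPre
  unfold Spec_generate_unit_html generate_unit_html generate_unit_html_alt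
  dsimp only
  have h := pvLoop_eq u json_data.length json_data (le_refl _)
    ("\n    <div class=\"unit-section\">\n        <div class=\"unit-header\">\n            <a href=\"Merriam-Webster's_Vocabulary_Builder/Unit" ++ PySem.Int.toStr u ++ ".txt.html\">" ++ ("Unit " ++ PySem.Int.toStr u) ++ "</a>\n            <a href=\"Merriam-Webster's_Vocabulary_Builder/Unit" ++ PySem.Int.toStr u ++ "_supplement.txt.html\">[Supplement]</a>\n        </div>\n        <table class=\"unit-table\">\n            <tbody>\n    ")
  unfold pvFinishA at h
  rw [h]
  unfold pvB_core
  dsimp only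
  have hcell : (fun e : List (String × String) =>
      "<td><a href=\"" ++ ("Merriam-Webster's_Vocabulary_Builder/Unit" ++ PySem.Int.toStr u) ++ ".txt.html#" ++ ((e.lookup "root").getD "") ++ "\">" ++ ((e.lookup "root").getD "") ++ "</a></td>")
      = pvCell u := by
    funext e
    simp [pvCell, String.ext_iff, String.append_assoc]
  simp only [hcell]
  by_cases hodd : (json_data.map (pvCell u)).length % 2 == 1
  · simp only [hodd, if_true]
    simp [String.ext_iff, String.append_assoc]
  · simp only [hodd, Bool.false_eq_true, if_false]
    simp [String.ext_iff, String.append_assoc]
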